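-- pv_equiv track=rewrite | github.com/CodePrometheus/Starry-AI | machine_learning/15_sequence_modeling/01_sequence_modeling_basics.py | build_next_token_examples
-- ===== SOURCE A (Python) =====
-- def build_next_token_examples(
--     encoded_sequence: list[int],
--     context_size: int,
--     pad_id: int,
-- ) -> list[tuple[list[int], int]]:
--     """把一条序列切成“前文 -> 下一个 token”的监督学习样本。"""
--     pairs: list[tuple[list[int], int]] = []
--     for target_pos in range(1, len(encoded_sequence)):
--         context = encoded_sequence[max(0, target_pos - context_size):target_pos]
--         if len(context) < context_size:
--             context = [pad_id] * (context_size - len(context)) + context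
--         target = encoded_sequence[target_pos]
--         pairs.append((context, target))
--     return pairs
-- ===== SOURCE B (Python) =====
-- def build_next_token_examples(
--     encoded_sequence: list[int],
--     context_size: int,
--     pad_id: int,
-- ) -> list[tuple[list[int], int]]:
--     c = max(context_size, 0)
--     padded = [pad_id] * c + encoded_sequence
--     return [
--         (padded[p:p + c], encoded_sequence[p])
--         for p in range(1, len(encoded_sequence))
--     ]
-- ===== Notes on version B (the rewrite author's own statement) =====
-- stated objective: simpler
-- what changed: Builds one up-front pad buffer ([pad_id]*context_size prepended once) and emits each example by a uniform fixed-size slice of it, eliminating A's per-iteration max(0,...) start computation and conditional left-padding branch.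
import Mathlib
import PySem

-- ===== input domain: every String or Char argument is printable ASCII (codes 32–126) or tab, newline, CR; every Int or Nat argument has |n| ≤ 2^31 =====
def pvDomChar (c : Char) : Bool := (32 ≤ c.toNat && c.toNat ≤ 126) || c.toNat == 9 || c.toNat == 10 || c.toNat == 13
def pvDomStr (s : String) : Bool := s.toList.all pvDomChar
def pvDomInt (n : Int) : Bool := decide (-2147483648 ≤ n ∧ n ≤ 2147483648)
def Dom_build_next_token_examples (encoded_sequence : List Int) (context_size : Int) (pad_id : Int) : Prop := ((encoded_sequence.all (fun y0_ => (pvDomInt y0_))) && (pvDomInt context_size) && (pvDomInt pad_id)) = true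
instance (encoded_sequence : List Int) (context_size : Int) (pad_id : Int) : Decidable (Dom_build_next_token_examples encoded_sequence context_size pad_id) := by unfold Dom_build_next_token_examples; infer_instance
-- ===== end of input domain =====

-- B replaces A's per-iteration conditional left-padding with one up-front pad buffer and
-- uniform fixed-size slicing (objective: simpler). Return values proved equal; neither mutates.

-- ===== PORT A =====
def build_next_token_examples (encoded_sequence : List Int) (context_size : Int) (pad_id : Int) : List (List Int × Int) :=
  (PySem.List.pyRange 1 (encoded_sequence.length : Int) 1).foldl
    (fun pairs target_pos =>
      let context :=
        PySem.List.slice encoded_sequence (some (max 0 (target_pos - context_size))) (some target_pos)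
      let context :=
        if (context.length : Int) < context_size then
          List.replicate (context_size - (context.length : Int)).toNat pad_id ++ context
        else context
      -- encoded_sequence[target_pos]: target_pos is always in range inside this loop, so the
      -- .getD 0 default is never used
      let target := (PySem.List.pyGet? encoded_sequence target_pos).getD 0
      pairs ++ [(context, target)]) []

-- ===== PORT B =====
def build_next_token_examples_alt (encoded_sequence : List Int) (context_size : Int) (pad_id : Int) : List (List Int × Int) :=
  let c := max context_size 0
  let padded := List.replicate c.toNat pad_id ++ encoded_sequence
  (PySem.List.pyRange 1 (encoded_sequence.length : Int) 1).map
    (fun p => (PySem.List.slice padded (some p) (some (p + c)),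
               (PySem.List.pyGet? encoded_sequence p).getD 0))

-- ===== PRECONDITION & SPEC =====
def Spec_build_next_token_examples (encoded_sequence : List Int) (context_size : Int) (pad_id : Int) (out : List (List Int × Int)) : Prop := out = build_next_token_examples_alt encoded_sequence context_size pad_id
instance (encoded_sequence : List Int) (context_size : Int) (pad_id : Int) (out : List (List Int × Int)) : Decidable (Spec_build_next_token_examples encoded_sequence context_size pad_id out) := by unfold Spec_build_next_token_examples; infer_instance

-- ===== CLAIM (what is proved, stated in full; the proofs are below) =====
def Claim_equal_build_next_token_examples : Prop := ∀ (encoded_sequence : List Int) (context_size : Int) (pad_id : Int), Dom_build_next_token_examples encoded_sequence context_size pad_id → Spec_build_next_token_examples encoded_sequence context_size pad_id (build_next_token_examples encoded_sequence context_size pad_id)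

-- ===== LEMMAS AND PROOFS =====

-- the per-position contexts agree
lemma ctx_eq (seq : List Int) (c pad p : Int) (h1 : 1 ≤ p) (h2 : p < (seq.length : Int)) :
    (let context := PySem.List.slice seq (some (max 0 (p - c))) (some p)
     if (context.length : Int) < c then
       List.replicate (c - (context.length : Int)).toNat pad ++ context
     else context)
    = PySem.List.slice (List.replicate (max c 0).toNat pad ++ seq) (some p) (some (p + max c 0)) := by
  obtain ⟨j, rfl⟩ : ∃ j : Nat, p = (j : Int) := ⟨p.toNat, (Int.toNat_of_nonneg (by omega)).symm⟩
  have hj1 : 1 ≤ j := by exact_mod_cast h1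
  have hj2 : j < seq.length := by exact_mod_cast h2
  by_cases hc : c ≤ 0
  · -- c ≤ 0: both contexts are empty
    have hmax : max 0 ((j : Int) - c) = ((j + (-c).toNat : Nat) : Int) := by push_cast; omega
    have hmc : max c 0 = 0 := by omega
    rw [hmax, hmc, PySem.List.slice_natCast]
    simp only [show ((0 : Int)).toNat = 0 from rfl, List.replicate_zero, List.nil_append, add_zero,
      PySem.List.slice_natCast]
    rw [show j - (j + (-c).toNat) = 0 by omega, List.take_zero]
    simp only [List.length_nil, Nat.cast_zero]
    rw [if_neg (by omega), show j - j = 0 by omega, List.take_zero]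
  · rw [not_le] at hc
    obtain ⟨cn, rfl⟩ : ∃ cn : Nat, c = (cn : Int) := ⟨c.toNat, (Int.toNat_of_nonneg (by omega)).symm⟩
    have hcn : 0 < cn := by exact_mod_cast hc
    have hR : PySem.List.slice (List.replicate (max (cn : Int) 0).toNat pad ++ seq)
        (some (j : Int)) (some ((j : Int) + max (cn : Int) 0))
        = List.replicate (cn - j) pad ++ (seq.drop (j - cn)).take (cn - (cn - j)) := by
      rw [show max ((cn : Int)) 0 = (cn : Int) by omega,
          show (j : Int) + (cn : Int) = ((j + cn : Nat) : Int) by push_cast; ring,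
          show ((cn : Int)).toNat = cn by omega, PySem.List.slice_natCast,
          List.drop_append, List.take_append, List.drop_replicate, List.take_replicate,
          List.length_replicate]
      rw [show j + cn - j = cn by omega, show min cn (cn - j) = cn - j by omega]
      simp [List.length_replicate]
    rw [hR]
    by_cases hge : cn ≤ j
    · -- no padding needed
      have hmax : max 0 ((j : Int) - (cn : Int)) = ((j - cn : Nat) : Int) := by omega
      rw [hmax, PySem.List.slice_natCast, show j - (j - cn) = cn by omega]
      have hlen : ((seq.drop (j - cn)).take cn).length = cn := by
        simp [List.length_take, List.length_drop]; omega
      rw [if_neg (by rw [hlen]; exact lt_irrefl _)]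
      rw [show cn - j = 0 by omega, List.replicate_zero, List.nil_append,
          show cn - 0 = cn by omega]
    · -- j < cn: left padding
      rw [not_le] at hge
      have hmax : max 0 ((j : Int) - (cn : Int)) = ((0 : Nat) : Int) := by push_cast; omega
      rw [hmax, PySem.List.slice_natCast, List.drop_zero, Nat.sub_zero]
      have hlen : (seq.take j).length = j := by simp [List.length_take]; omega
      rw [if_pos (by rw [hlen]; exact_mod_cast hge), hlen,
          show (((cn : Int)) - ((j : Int))).toNat = cn - j by omega,
          show j - cn = 0 by omega, List.drop_zero, show cn - (cn - j) = j by omega]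

theorem build_next_token_examples_spec_aux (seq : List Int) (c pad : Int) :
    build_next_token_examples seq c pad = build_next_token_examples_alt seq c pad := by
  unfold build_next_token_examples build_next_token_examples_alt
  rw [PySem.List.foldl_append_singleton_eq_map, List.nil_append]
  apply List.map_congr_left
  intro p hp
  rw [PySem.List.mem_pyRange_one] at hp
  exact Prod.ext (ctx_eq seq c pad p hp.1 hp.2) rfl

-- ===== VERDICT (by name: the statement is the Claim_ definition above) =====
theorem build_next_token_examples_spec : Claim_equal_build_next_token_examples := by
  intro seq c pad _
  exact build_next_token_examples_spec_aux seq c pad
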